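-- pv_equiv track=rewrite | github.com/npantojamorales/CampLogic | functions.py | choose_afternoon_groups
-- ===== SOURCE A (Python) =====
-- import math
--
-- def choose_afternoon_groups(
--     num_campers_afternoon: int,
--     num_counselors_afternoon: int,
--     min_groups: int = 8,
--     max_groups: int = 10,
--     min_group_size: int = 12,
--     max_group_size: int = 18,
--     camper_per_counselor: int = 10,
--     min_counselors_per_group: int = 2
-- ) -> int:
--     feasible = []
--
--     for g in range(min_groups, max_groups + 1):
--         # group size feasibility
--         if num_campers_afternoon < g * min_group_size:
--             continue
--         if num_campers_afternoon > g * max_group_size: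
--             continue
--
--         # staffing feasibility
--         ratio_needed = math.ceil(num_campers_afternoon / camper_per_counselor)
--         per_group_needed = g * min_counselors_per_group
--         counselors_needed = max(ratio_needed, per_group_needed)
--
--         if num_counselors_afternoon >= counselors_needed:
--             feasible.append(g)
--
--     return max(feasible) if feasible else min_groups
-- ===== SOURCE B (Python) =====
-- def _bound_le(lo, hi, a, b):
--     # restrict the integer interval [lo, hi] to { g : a*g <= b }
--     if a > 0:
--         return lo, min(hi, b // a)
--     if a < 0:
--         return max(lo, -((-b) // a)), hi
--     return (lo, hi) if b >= 0 else (lo, lo - 1)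
--
--
-- def _bound_ge(lo, hi, a, b):
--     # restrict the integer interval [lo, hi] to { g : a*g >= b }
--     if a > 0:
--         return max(lo, -((-b) // a)), hi
--     if a < 0:
--         return lo, min(hi, b // a)
--     return (lo, hi) if b <= 0 else (lo, lo - 1)
--
--
-- def choose_afternoon_groups(
--     num_campers_afternoon: int,
--     num_counselors_afternoon: int,
--     min_groups: int = 8,
--     max_groups: int = 10,
--     min_group_size: int = 12,
--     max_group_size: int = 18,
--     camper_per_counselor: int = 10,
--     min_counselors_per_group: int = 2
-- ) -> int:
--     # Interval arithmetic instead of scanning: each constraint is linear in g,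
--     # so the feasible group counts form an interval whose right endpoint is the answer.
--     lo, hi = _bound_le(min_groups, max_groups, min_group_size, num_campers_afternoon)
--     lo, hi = _bound_ge(lo, hi, max_group_size, num_campers_afternoon)
--     if lo > hi:
--         return min_groups
--     if num_counselors_afternoon < -((-num_campers_afternoon) // camper_per_counselor):
--         return min_groups
--     lo, hi = _bound_le(lo, hi, min_counselors_per_group, num_counselors_afternoon)
--     return hi if lo <= hi else min_groups
-- ===== Notes on version B (the rewrite author's own statement) =====
-- stated objective: alternative
-- what changed: Replaces A's scan over [min_groups, max_groups] (collecting feasible counts and taking max) by closed-form interval arithmetic: each constraint is linear in g, so the feasible set is intersected as an integer interval via floor/ceil division and the right endpoint is returned directly, with no loop at all; B raises ZeroDivisionError exactly where A does (camper_per_counselor = 0 with a size-feasible group count), so Pre_ excludes those inputs.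
import Mathlib
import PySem

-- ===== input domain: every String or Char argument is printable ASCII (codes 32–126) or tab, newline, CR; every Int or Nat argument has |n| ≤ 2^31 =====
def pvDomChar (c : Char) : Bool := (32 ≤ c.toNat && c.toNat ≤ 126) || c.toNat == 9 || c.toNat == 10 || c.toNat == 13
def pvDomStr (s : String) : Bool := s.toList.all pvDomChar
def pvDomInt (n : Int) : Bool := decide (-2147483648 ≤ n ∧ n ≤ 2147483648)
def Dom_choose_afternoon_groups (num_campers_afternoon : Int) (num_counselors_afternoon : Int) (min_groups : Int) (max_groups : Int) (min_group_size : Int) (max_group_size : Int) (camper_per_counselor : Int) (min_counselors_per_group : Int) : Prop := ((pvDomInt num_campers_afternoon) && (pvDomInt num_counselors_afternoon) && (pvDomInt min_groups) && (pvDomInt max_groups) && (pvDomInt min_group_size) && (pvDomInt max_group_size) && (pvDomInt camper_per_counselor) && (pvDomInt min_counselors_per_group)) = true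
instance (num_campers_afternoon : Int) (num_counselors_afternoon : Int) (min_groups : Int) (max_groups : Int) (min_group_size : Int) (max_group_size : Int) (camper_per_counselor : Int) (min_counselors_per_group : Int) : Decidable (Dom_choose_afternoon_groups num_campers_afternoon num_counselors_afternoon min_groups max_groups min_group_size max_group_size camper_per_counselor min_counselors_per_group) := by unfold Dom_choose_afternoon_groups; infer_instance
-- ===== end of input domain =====

-- B replaces A's scan over group counts by direct interval arithmetic: each constraint is
-- linear in g, so the feasible set is an interval and its right endpoint is the answer (simpler, no loop).


-- ===== PORT A =====
-- math.ceil(c / k) on true division: exact as -((-c) // k) for |c| ≤ 2^31 < 2^53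
-- (the float rounding error of c/k is strictly smaller than its distance to any other integer).
def choose_afternoon_groups (num_campers_afternoon : Int) (num_counselors_afternoon : Int) (min_groups : Int) (max_groups : Int) (min_group_size : Int) (max_group_size : Int) (camper_per_counselor : Int) (min_counselors_per_group : Int) : Int :=
  let feasible : List Int :=
    (PySem.List.pyRange min_groups (max_groups + 1) 1).foldl
      (fun acc g =>
        if num_campers_afternoon < g * min_group_size then acc
        else if num_campers_afternoon > g * max_group_size then acc
        else
          let ratio_needed := -(PySem.Int.floordiv (-num_campers_afternoon) camper_per_counselor)
          let per_group_needed := g * min_counselors_per_group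
          let counselors_needed := max ratio_needed per_group_needed
          if num_counselors_afternoon ≥ counselors_needed then acc ++ [g] else acc)
      []
  match PySem.List.max? feasible (fun y => y) with
  | some v => v
  | none => min_groups

-- ===== PORT B =====
-- restrict the integer interval [lo, hi] to { g : a*g ≤ b }
def cagLeBound (lo hi a b : Int) : Int × Int :=
  if a > 0 then (lo, min hi (PySem.Int.floordiv b a))
  else if a < 0 then (max lo (-(PySem.Int.floordiv (-b) a)), hi)
  else if b ≥ 0 then (lo, hi) else (lo, lo - 1)

-- restrict the integer interval [lo, hi] to { g : a*g ≥ b }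
def cagGeBound (lo hi a b : Int) : Int × Int :=
  if a > 0 then (max lo (-(PySem.Int.floordiv (-b) a)), hi)
  else if a < 0 then (lo, min hi (PySem.Int.floordiv b a))
  else if b ≤ 0 then (lo, hi) else (lo, lo - 1)

def choose_afternoon_groups_alt (num_campers_afternoon : Int) (num_counselors_afternoon : Int) (min_groups : Int) (max_groups : Int) (min_group_size : Int) (max_group_size : Int) (camper_per_counselor : Int) (min_counselors_per_group : Int) : Int :=
  let p1 := cagLeBound min_groups max_groups min_group_size num_campers_afternoon
  let p2 := cagGeBound p1.1 p1.2 max_group_size num_campers_afternoon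
  if p2.1 > p2.2 then min_groups
  else if num_counselors_afternoon < -(PySem.Int.floordiv (-num_campers_afternoon) camper_per_counselor) then min_groups
  else
    let p3 := cagLeBound p2.1 p2.2 min_counselors_per_group num_counselors_afternoon
    if p3.1 ≤ p3.2 then p3.2 else min_groups

-- ===== PRECONDITION & SPEC =====
-- closed-form test: does some g in [gmin, gmax] satisfy smin*g ≤ C ≤ smax*g? (interval arithmetic by sign)
def pvSizeFeasible (C gmin gmax smin smax : Int) : Prop :=
  (smin = 0 → 0 ≤ C) ∧ (smax = 0 → C ≤ 0) ∧
  max gmin (max (if 0 < smax then -(PySem.Int.floordiv (-C) smax) else gmin)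
                (if smin < 0 then -(PySem.Int.floordiv (-C) smin) else gmin))
    ≤ min gmax (min (if 0 < smin then PySem.Int.floordiv C smin else gmax)
                    (if smax < 0 then PySem.Int.floordiv C smax else gmax))

-- Pre_ excludes exactly the inputs on which the Python raises ZeroDivisionError:
-- camper_per_counselor = 0 while some group count in [min_groups, max_groups] passes the size checks.
def Pre_choose_afternoon_groups (num_campers_afternoon : Int) (num_counselors_afternoon : Int) (min_groups : Int) (max_groups : Int) (min_group_size : Int) (max_group_size : Int) (camper_per_counselor : Int) (min_counselors_per_group : Int) : Prop :=
  camper_per_counselor ≠ 0 ∨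
  ¬ pvSizeFeasible num_campers_afternoon min_groups max_groups min_group_size max_group_size
instance (num_campers_afternoon : Int) (num_counselors_afternoon : Int) (min_groups : Int) (max_groups : Int) (min_group_size : Int) (max_group_size : Int) (camper_per_counselor : Int) (min_counselors_per_group : Int) : Decidable (Pre_choose_afternoon_groups num_campers_afternoon num_counselors_afternoon min_groups max_groups min_group_size max_group_size camper_per_counselor min_counselors_per_group) := by unfold Pre_choose_afternoon_groups pvSizeFeasible; infer_instance

def pvWitness_choose_afternoon_groups : Int × Int × Int × Int × Int × Int × Int × Int := (100, 20, 8, 10, 12, 18, 10, 2)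

def Spec_choose_afternoon_groups (num_campers_afternoon : Int) (num_counselors_afternoon : Int) (min_groups : Int) (max_groups : Int) (min_group_size : Int) (max_group_size : Int) (camper_per_counselor : Int) (min_counselors_per_group : Int) (out : Int) : Prop := out = choose_afternoon_groups_alt num_campers_afternoon num_counselors_afternoon min_groups max_groups min_group_size max_group_size camper_per_counselor min_counselors_per_group
instance (num_campers_afternoon : Int) (num_counselors_afternoon : Int) (min_groups : Int) (max_groups : Int) (min_group_size : Int) (max_group_size : Int) (camper_per_counselor : Int) (min_counselors_per_group : Int) (out : Int) : Decidable (Spec_choose_afternoon_groups num_campers_afternoon num_counselors_afternoon min_groups max_groups min_group_size max_group_size camper_per_counselor min_counselors_per_group out) := by unfold Spec_choose_afternoon_groups; infer_instance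

-- ===== CLAIM (what is proved, stated in full; the proofs are below) =====
def Claim_equal_choose_afternoon_groups : Prop := ∀ (num_campers_afternoon : Int) (num_counselors_afternoon : Int) (min_groups : Int) (max_groups : Int) (min_group_size : Int) (max_group_size : Int) (camper_per_counselor : Int) (min_counselors_per_group : Int), Dom_choose_afternoon_groups num_campers_afternoon num_counselors_afternoon min_groups max_groups min_group_size max_group_size camper_per_counselor min_counselors_per_group → Pre_choose_afternoon_groups num_campers_afternoon num_counselors_afternoon min_groups max_groups min_group_size max_group_size camper_per_counselor min_counselors_per_group → Spec_choose_afternoon_groups num_campers_afternoon num_counselors_afternoon min_groups max_groups min_group_size max_group_size camper_per_counselor min_counselors_per_group (choose_afternoon_groups num_campers_afternoon num_counselors_afternoon min_groups max_groups min_group_size max_group_size camper_per_counselor min_counselors_per_group)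

-- ===== LEMMAS AND PROOFS =====

-- the descending first-hit scan: a proof-side stepping stone between A's fold and B's intervals
def cagScan (num_campers_afternoon : Int) (num_counselors_afternoon : Int) (min_groups : Int) (min_group_size : Int) (max_group_size : Int) (camper_per_counselor : Int) (min_counselors_per_group : Int) (g : Int) : Int :=
  if h : g ≥ min_groups then
    if min_group_size * g ≤ num_campers_afternoon ∧ num_campers_afternoon ≤ max_group_size * g then
      if num_counselors_afternoon ≥
          max (-(PySem.Int.floordiv (-num_campers_afternoon) camper_per_counselor))
              (min_counselors_per_group * g) then g
      else cagScan num_campers_afternoon num_counselors_afternoon min_groups min_group_size max_group_size camper_per_counselor min_counselors_per_group (g - 1)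
    else cagScan num_campers_afternoon num_counselors_afternoon min_groups min_group_size max_group_size camper_per_counselor min_counselors_per_group (g - 1)
  else min_groups
termination_by (g + 1 - min_groups).toNat
decreasing_by all_goals (simp_wf; omega)

-- max() of a list whose last element dominates all earlier ones
theorem pv_max_last (l : List Int) (g : Int) (h : ∀ x ∈ l, x < g) :
    PySem.List.max? (l ++ [g]) (fun y => y) = some g := by
  cases hm : PySem.List.max? (l ++ [g]) (fun y => y) with
  | none =>
      rw [PySem.List.max?_eq_none_iff] at hm
      simp at hm
  | some m =>
      have hmem := PySem.List.max?_mem hm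
      have hmax := PySem.List.max?_isMax hm g (by simp)
      rcases List.mem_append.1 hmem with h1 | h2
      · have := h m h1; simp at hmax; omega
      · simp at h2; rw [h2]

-- elements accumulated by a conditional-append fold come from the accumulator or the list
theorem pv_foldl_mem {α : Type} (f : List α → α → List α)
    (hf : ∀ acc b, ∀ x ∈ f acc b, x ∈ acc ∨ x = b) :
    ∀ (l acc : List α) (x : α), x ∈ l.foldl f acc → x ∈ acc ∨ x ∈ l := by
  intro l
  induction l with
  | nil => simp
  | cons b t ih =>
      intro acc x hx
      rcases ih (f acc b) x hx with h | h
      · rcases hf acc b x h with h' | h' <;> simp [h']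
      · simp [h]

-- A's fold over the range equals the descending scan
theorem pv_main (nc nco gmin smin smax k m : Int) : ∀ (n : Nat) (g : Int), (g + 1 - gmin).toNat = n →
    (match PySem.List.max?
        ((PySem.List.pyRange gmin (g + 1) 1).foldl
          (fun acc g =>
            if nc < g * smin then acc
            else if nc > g * smax then acc
            else
              let ratio_needed := -(PySem.Int.floordiv (-nc) k)
              let per_group_needed := g * m
              let counselors_needed := max ratio_needed per_group_needed
              if nco ≥ counselors_needed then acc ++ [g] else acc)
          []) (fun y => y) with
      | some v => v
      | none => gmin)
    = cagScan nc nco gmin smin smax k m g := by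
  intro n
  induction n using Nat.strong_induction_on with
  | _ n ih =>
    intro g hn
    by_cases hlow : g < gmin
    · rw [PySem.List.pyRange_one_eq_nil (by omega)]
      rw [cagScan]
      simp [PySem.List.max?, hlow, show ¬ g ≥ gmin by omega]
    · rw [not_lt] at hlow
      have hsplit : PySem.List.pyRange gmin (g + 1) 1
          = PySem.List.pyRange gmin g 1 ++ [g] :=
        PySem.List.pyRange_one_succ_right hlow
      rw [hsplit, List.foldl_append, List.foldl_cons, List.foldl_nil]
      have hmem : ∀ x ∈ (PySem.List.pyRange gmin g 1).foldl
          (fun acc g =>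
            if nc < g * smin then acc
            else if nc > g * smax then acc
            else
              let ratio_needed := -(PySem.Int.floordiv (-nc) k)
              let per_group_needed := g * m
              let counselors_needed := max ratio_needed per_group_needed
              if nco ≥ counselors_needed then acc ++ [g] else acc) [], x < g := by
        intro x hx
        have hmm := pv_foldl_mem _ (by
          intro acc b y hyb
          dsimp only at hyb
          split_ifs at hyb
          · exact Or.inl hyb
          · exact Or.inl hyb
          · rcases List.mem_append.1 hyb with h | h
            · exact Or.inl h
            · simp at h; exact Or.inr h
          · exact Or.inl hyb) _ _ _ hx
        simp only [List.not_mem_nil, false_or] at hmm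
        exact ((PySem.List.mem_pyRange_one).1 hmm).2
      have ihg := ih (g - gmin).toNat (by omega) (g - 1) (by omega)
      rw [show g - 1 + 1 = g by ring] at ihg
      rw [cagScan]
      simp only [ge_iff_le, hlow, dite_true, dif_pos]
      by_cases hs1 : nc < g * smin
      · have hb : ¬ (smin * g ≤ nc ∧ nc ≤ smax * g) := by
          rw [mul_comm smin g]; omega
        simp only [if_pos hs1, if_neg hb]
        exact ihg
      · by_cases hs2 : nc > g * smax
        · have hb : ¬ (smin * g ≤ nc ∧ nc ≤ smax * g) := by
            rw [mul_comm smax g]; omega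
          simp only [if_neg hs1, if_pos hs2, if_neg hb]
          exact ihg
        · have hb : smin * g ≤ nc ∧ nc ≤ smax * g := by
            constructor
            · rw [mul_comm smin g]; omega
            · rw [mul_comm smax g]; omega
          by_cases hst : nco ≥ max (-(PySem.Int.floordiv (-nc) k)) (g * m)
          · have hst' : max (-(PySem.Int.floordiv (-nc) k)) (m * g) ≤ nco := by
              rw [mul_comm m g]; exact hst
            simp only [if_neg hs1, if_neg hs2]
            simp only [ge_iff_le, if_pos hst]
            rw [pv_max_last _ _ hmem]
            simp only [if_pos hb, if_pos hst']
          · have hst' : ¬ max (-(PySem.Int.floordiv (-nc) k)) (m * g) ≤ nco := by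
              rw [mul_comm m g]; exact hst
            simp only [if_neg hs1, if_neg hs2]
            simp only [ge_iff_le, if_neg hst]
            simp only [if_pos hb, if_neg hst']
            exact ihg

-- floor/ceil brackets as iffs on a*g ≤ b / b ≤ a*g, all four divisor signs
theorem pv_mul_le_iff_pos (a b g : Int) (ha : 0 < a) :
    a * g ≤ b ↔ g ≤ PySem.Int.floordiv b a := by
  rw [mul_comm]; exact (PySem.Int.le_floordiv_iff_mul_le ha).symm

theorem pv_mul_ge_iff_pos (a b g : Int) (ha : 0 < a) :
    b ≤ a * g ↔ -(PySem.Int.floordiv (-b) a) ≤ g := by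
  have h := PySem.Int.le_floordiv_iff_mul_le (a := -b) (b := a) (q := -g) ha
  rw [neg_le, h, neg_mul, mul_comm g a]
  constructor <;> intro h' <;> linarith

theorem pv_mul_le_iff_neg (a b g : Int) (ha : a < 0) :
    a * g ≤ b ↔ -(PySem.Int.floordiv (-b) a) ≤ g := by
  have hrw : PySem.Int.floordiv (-b) a = PySem.Int.floordiv b (-a) := by
    simpa using PySem.Int.floordiv_neg_neg b (-a)
  have h := pv_mul_ge_iff_pos (-a) (-b) g (by omega)
  simp only [neg_neg] at h
  rw [hrw, ← h, neg_mul]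
  constructor <;> intro h' <;> linarith

theorem pv_mul_ge_iff_neg (a b g : Int) (ha : a < 0) :
    b ≤ a * g ↔ g ≤ PySem.Int.floordiv b a := by
  have hrw : PySem.Int.floordiv b a = PySem.Int.floordiv (-b) (-a) := by
    simpa using (PySem.Int.floordiv_neg_neg (-b) (-a)).symm
  rw [hrw, ← pv_mul_le_iff_pos (-a) (-b) g (by omega), neg_mul]
  constructor <;> intro h' <;> linarith

-- interval exactness of the two bound helpers
theorem pv_mem_leBound (lo hi a b g : Int) :
    ((cagLeBound lo hi a b).1 ≤ g ∧ g ≤ (cagLeBound lo hi a b).2) ↔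
      (lo ≤ g ∧ g ≤ hi ∧ a * g ≤ b) := by
  unfold cagLeBound
  rcases lt_trichotomy a 0 with ha | ha | ha
  · rw [if_neg (by omega), if_pos ha]
    rw [pv_mul_le_iff_neg a b g ha]
    simp only [max_le_iff]
    tauto
  · subst ha
    rw [if_neg (by omega), if_neg (by omega)]
    by_cases hb : b ≥ 0
    · rw [if_pos hb]; simp <;> omega
    · rw [if_neg hb]; simp <;> omega
  · rw [if_pos ha]
    rw [pv_mul_le_iff_pos a b g ha]
    simp only [le_min_iff]

theorem pv_mem_geBound (lo hi a b g : Int) :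
    ((cagGeBound lo hi a b).1 ≤ g ∧ g ≤ (cagGeBound lo hi a b).2) ↔
      (lo ≤ g ∧ g ≤ hi ∧ b ≤ a * g) := by
  unfold cagGeBound
  rcases lt_trichotomy a 0 with ha | ha | ha
  · rw [if_neg (by omega), if_pos ha]
    rw [pv_mul_ge_iff_neg a b g ha]
    simp only [le_min_iff]
  · subst ha
    rw [if_neg (by omega), if_neg (by omega)]
    by_cases hb : b ≤ 0
    · rw [if_pos hb]; simp <;> omega
    · rw [if_neg hb]; simp <;> omega
  · rw [if_pos ha]
    rw [pv_mul_ge_iff_pos a b g ha]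
    simp only [max_le_iff]
    tauto

-- the scan returns min_groups when no group count in [gmin, g] is feasible
theorem pv_scan_none (nc nco gmin smin smax k m : Int) : ∀ (n : Nat) (g : Int), (g + 1 - gmin).toNat = n →
    (∀ x, gmin ≤ x → x ≤ g →
      ¬ ((smin * x ≤ nc ∧ nc ≤ smax * x) ∧
          nco ≥ max (-(PySem.Int.floordiv (-nc) k)) (m * x))) →
    cagScan nc nco gmin smin smax k m g = gmin := by
  intro n
  induction n using Nat.strong_induction_on with
  | _ n ih =>
    intro g hn hno
    rw [cagScan]
    by_cases hlow : g ≥ gmin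
    · rw [dif_pos hlow]
      have hng := hno g hlow le_rfl
      by_cases hsz : smin * g ≤ nc ∧ nc ≤ smax * g
      · rw [if_pos hsz, if_neg (by tauto)]
        exact ih (g - gmin).toNat (by omega) (g - 1) (by omega)
          (fun x h1 h2 => hno x h1 (by omega))
      · rw [if_neg hsz]
        exact ih (g - gmin).toNat (by omega) (g - 1) (by omega)
          (fun x h1 h2 => hno x h1 (by omega))
    · rw [dif_neg hlow]

-- the scan returns r when r is feasible and nothing above it (up to g) is
theorem pv_scan_hit (nc nco gmin smin smax k m r : Int) : ∀ (n : Nat) (g : Int), (g + 1 - gmin).toNat = n →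
    gmin ≤ r → r ≤ g →
    ((smin * r ≤ nc ∧ nc ≤ smax * r) ∧
        nco ≥ max (-(PySem.Int.floordiv (-nc) k)) (m * r)) →
    (∀ x, r < x → x ≤ g →
      ¬ ((smin * x ≤ nc ∧ nc ≤ smax * x) ∧
          nco ≥ max (-(PySem.Int.floordiv (-nc) k)) (m * x))) →
    cagScan nc nco gmin smin smax k m g = r := by
  intro n
  induction n using Nat.strong_induction_on with
  | _ n ih =>
    intro g hn hr1 hr2 hQ hno
    rw [cagScan, dif_pos (by omega : g ≥ gmin)]
    by_cases hgr : g = r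
    · subst hgr
      rw [if_pos hQ.1, if_pos hQ.2]
    · have hng := hno g (by omega) le_rfl
      by_cases hsz : smin * g ≤ nc ∧ nc ≤ smax * g
      · rw [if_pos hsz, if_neg (by tauto)]
        exact ih (g - gmin).toNat (by omega) (g - 1) (by omega) hr1 (by omega) hQ
          (fun x h1 h2 => hno x h1 (by omega))
      · rw [if_neg hsz]
        exact ih (g - gmin).toNat (by omega) (g - 1) (by omega) hr1 (by omega) hQ
          (fun x h1 h2 => hno x h1 (by omega))

-- ===== VERDICT (by name: the statement is the Claim_ definition above) =====
theorem choose_afternoon_groups_spec : Claim_equal_choose_afternoon_groups := by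
  intro nc nco gmin gmax smin smax k m _ _
  unfold Spec_choose_afternoon_groups choose_afternoon_groups choose_afternoon_groups_alt
  rw [show (match PySem.List.max?
        ((PySem.List.pyRange gmin (gmax + 1) 1).foldl
          (fun acc g =>
            if nc < g * smin then acc
            else if nc > g * smax then acc
            else
              let ratio_needed := -(PySem.Int.floordiv (-nc) k)
              let per_group_needed := g * m
              let counselors_needed := max ratio_needed per_group_needed
              if nco ≥ counselors_needed then acc ++ [g] else acc)
          []) (fun y => y) with
      | some v => v
      | none => gmin) = cagScan nc nco gmin smin smax k m gmax
    from pv_main nc nco gmin smin smax k m (gmax + 1 - gmin).toNat gmax rfl]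
  have hmem2 : ∀ g : Int,
      ((cagGeBound (cagLeBound gmin gmax smin nc).1 (cagLeBound gmin gmax smin nc).2 smax nc).1 ≤ g ∧
        g ≤ (cagGeBound (cagLeBound gmin gmax smin nc).1 (cagLeBound gmin gmax smin nc).2 smax nc).2) ↔
      (gmin ≤ g ∧ g ≤ gmax ∧ smin * g ≤ nc ∧ nc ≤ smax * g) := by
    intro g
    rw [pv_mem_geBound, ← and_assoc, and_assoc, ← and_assoc, pv_mem_leBound]
    tauto
  set p := cagGeBound (cagLeBound gmin gmax smin nc).1 (cagLeBound gmin gmax smin nc).2 smax nc with hp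
  by_cases h1 : p.1 > p.2
  · rw [if_pos h1]
    exact pv_scan_none nc nco gmin smin smax k m _ gmax rfl
      (fun x hx1 hx2 hQ => by
        have := (hmem2 x).2 ⟨hx1, hx2, hQ.1.1, hQ.1.2⟩
        omega)
  · rw [if_neg h1]
    by_cases h2 : nco < -(PySem.Int.floordiv (-nc) k)
    · rw [if_pos h2]
      exact pv_scan_none nc nco gmin smin smax k m _ gmax rfl
        (fun x _ _ hQ => by
          have := hQ.2
          simp only [ge_iff_le, max_le_iff] at this
          omega)
    · rw [if_neg h2]
      have hmem3 : ∀ g : Int,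
          ((cagLeBound p.1 p.2 m nco).1 ≤ g ∧ g ≤ (cagLeBound p.1 p.2 m nco).2) ↔
          (gmin ≤ g ∧ g ≤ gmax ∧ smin * g ≤ nc ∧ nc ≤ smax * g ∧ m * g ≤ nco) := by
        intro g
        rw [pv_mem_leBound]
        constructor
        · rintro ⟨hb1, hb2, hb3⟩
          have h := (hmem2 g).1 ⟨hb1, hb2⟩
          exact ⟨h.1, h.2.1, h.2.2.1, h.2.2.2, hb3⟩
        · rintro ⟨a1, a2, a3, a4, a5⟩
          have h := (hmem2 g).2 ⟨a1, a2, a3, a4⟩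
          exact ⟨h.1, h.2, a5⟩
      set q := cagLeBound p.1 p.2 m nco with hq
      by_cases h3 : q.1 ≤ q.2
      · rw [if_pos h3]
        have hr := (hmem3 q.2).1 ⟨h3, le_rfl⟩
        apply pv_scan_hit nc nco gmin smin smax k m q.2 (gmax + 1 - gmin).toNat gmax rfl
          hr.1 hr.2.1
        · refine ⟨⟨hr.2.2.1, hr.2.2.2.1⟩, ?_⟩
          simp only [ge_iff_le, max_le_iff]
          constructor
          · omega
          · exact hr.2.2.2.2
        · intro x hx1 hx2 hQ
          have hst := hQ.2
          simp only [ge_iff_le, max_le_iff] at hst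
          have hx := (hmem3 x).2 ⟨by omega, hx2, hQ.1.1, hQ.1.2, hst.2⟩
          omega
      · rw [if_neg h3]
        exact pv_scan_none nc nco gmin smin smax k m _ gmax rfl
          (fun x hx1 hx2 hQ => by
            have hst := hQ.2
            simp only [ge_iff_le, max_le_iff] at hst
            have := (hmem3 x).2 ⟨hx1, hx2, hQ.1.1, hQ.1.2, hst.2⟩
            omega)
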